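-- pv_equiv track=rewrite | github.com/ResonanceEnergy/DUBFORGE | engine/ableton_live.py | fibonacci_duration_pattern
-- ===== SOURCE A (Python) =====
-- FIBONACCI = [1, 1, 2, 3, 5, 8, 13, 21, 34, 55, 89, 144, 233]
--
-- def fibonacci_duration_pattern(bars: int) -> list:
--     """Generate bar-count patterns from Fibonacci numbers that sum to target bars."""
--     if bars <= 0:
--         return [1]
--     pattern = []
--     remaining = bars
--     fib_idx = len(FIBONACCI) - 1
--     while remaining > 0 and fib_idx >= 0:
--         f = FIBONACCI[fib_idx]
--         if f <= remaining:
--             pattern.append(f)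
--             remaining -= f
--         else:
--             fib_idx -= 1
--     if remaining > 0:
--         pattern.append(remaining)
--     return pattern
-- ===== SOURCE B (Python) =====
-- FIBONACCI = [1, 1, 2, 3, 5, 8, 13, 21, 34, 55, 89, 144, 233]
--
-- def fibonacci_duration_pattern(bars: int) -> list:
--     if bars <= 0:
--         return [1]
--     pattern = []
--     remaining = bars
--     for f in reversed(FIBONACCI):
--         pattern.extend([f] * (remaining // f))
--         remaining %= f
--     if remaining > 0:
--         pattern.append(remaining)
--     return pattern
-- ===== Notes on version B (the rewrite author's own statement) =====
-- stated objective: idiomatic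
-- what changed: Replaces the repeated-subtraction loop with index backtracking by a single divmod pass over the reversed Fibonacci list: each value contributes [f] * (remaining // f) at once and remaining %= f.
import Mathlib
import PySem

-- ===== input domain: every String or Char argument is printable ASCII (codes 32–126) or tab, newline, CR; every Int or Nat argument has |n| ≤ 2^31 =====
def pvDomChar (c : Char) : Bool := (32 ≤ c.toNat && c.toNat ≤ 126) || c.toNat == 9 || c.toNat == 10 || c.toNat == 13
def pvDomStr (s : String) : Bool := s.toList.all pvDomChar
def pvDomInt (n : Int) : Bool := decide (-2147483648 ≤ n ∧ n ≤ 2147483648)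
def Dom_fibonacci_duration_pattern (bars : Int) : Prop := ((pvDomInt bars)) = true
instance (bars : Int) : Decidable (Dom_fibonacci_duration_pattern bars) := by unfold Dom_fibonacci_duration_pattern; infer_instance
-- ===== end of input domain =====

-- B replaces A's repeated-subtraction greedy loop with index backtracking by one divmod
-- pass over the reversed Fibonacci list (idiomatic: one division per Fibonacci value).

-- ===== PORT A =====
def fibList : List Int := [1, 1, 2, 3, 5, 8, 13, 21, 34, 55, 89, 144, 233]

-- A's while loop: state (pattern, remaining, fib_idx).  The extra '0 < f' conjunct is a
-- pure totality guard (every FIBONACCI value reachable by the loop is positive in Python).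
def loopA (pattern : List Int) (remaining : Int) (fibIdx : Int) : List Int × Int :=
  if h : 0 < remaining ∧ 0 ≤ fibIdx then
    let f := (PySem.List.pyGet? fibList fibIdx).getD 0
    if hf : f ≤ remaining ∧ 0 < f then
      loopA (pattern ++ [f]) (remaining - f) fibIdx
    else
      loopA pattern remaining (fibIdx - 1)
  else (pattern, remaining)
termination_by remaining.toNat + (fibIdx + 1).toNat
decreasing_by
  all_goals obtain ⟨h1, h2⟩ := h
  · obtain ⟨h3, h4⟩ := hf
    omega
  · omega

def fibonacci_duration_pattern (bars : Int) : List Int :=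
  if bars ≤ 0 then [1]
  else
    let st := loopA [] bars ((fibList.length : Int) - 1)
    if 0 < st.2 then st.1 ++ [st.2] else st.1

-- ===== PORT B =====
def stepB (st : List Int × Int) (f : Int) : List Int × Int :=
  (st.1 ++ List.replicate (PySem.Int.floordiv st.2 f).toNat f, PySem.Int.mod st.2 f)

def fibonacci_duration_pattern_alt (bars : Int) : List Int :=
  if bars ≤ 0 then [1]
  else
    let st := fibList.reverse.foldl stepB ([], bars)
    if 0 < st.2 then st.1 ++ [st.2] else st.1

-- ===== PRECONDITION & SPEC =====
def Spec_fibonacci_duration_pattern (bars : Int) (out : List Int) : Prop := out = fibonacci_duration_pattern_alt bars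
instance (bars : Int) (out : List Int) : Decidable (Spec_fibonacci_duration_pattern bars out) := by unfold Spec_fibonacci_duration_pattern; infer_instance

-- ===== CLAIM (what is proved, stated in full; the proofs are below) =====
def Claim_equal_fibonacci_duration_pattern : Prop := ∀ (bars : Int), Dom_fibonacci_duration_pattern bars → Spec_fibonacci_duration_pattern bars (fibonacci_duration_pattern bars)

-- ===== LEMMAS AND PROOFS =====

theorem loopA_zero (pat : List Int) (i : Int) : loopA pat 0 i = (pat, 0) := by
  rw [loopA]; simp

-- One whole run of A's inner repetition at a fixed index equals one divmod step.
theorem loopA_div (pat : List Int) (r i f : Int) (hr : 0 ≤ r) (hi : 0 ≤ i) (hf : 0 < f)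
    (hget : (PySem.List.pyGet? fibList i).getD 0 = f) :
    loopA pat r i =
      loopA (pat ++ List.replicate (PySem.Int.floordiv r f).toNat f) (PySem.Int.mod r f) (i - 1) := by
  rw [PySem.Int.floordiv_eq_ediv_of_pos hf, PySem.Int.mod_eq_emod_of_pos hf]
  by_cases h0 : 0 < r
  · by_cases hle : f ≤ r
    · have hr' : 0 ≤ r - f := by omega
      have hstep := loopA_div (pat ++ [f]) (r - f) i f hr' hi hf hget
      rw [PySem.Int.floordiv_eq_ediv_of_pos hf, PySem.Int.mod_eq_emod_of_pos hf] at hstep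
      rw [loopA]
      simp only [h0, hi, and_self, dif_pos, hget]
      rw [dif_pos ⟨hle, hf⟩, hstep]
      have hdiv : (r - f) / f = r / f - 1 := by
        have h := Int.add_mul_ediv_right r (-1) (show f ≠ 0 by omega)
        rw [show r + -1 * f = r - f by ring] at h
        omega
      have hmod : (r - f) % f = r % f := Int.sub_emod_right r f
      have hq : 0 ≤ r / f - 1 := by
        have : 1 ≤ r / f := Int.le_ediv_iff_mul_le hf |>.mpr (by omega)
        omega
      have hrep : (pat ++ [f]) ++ List.replicate ((r - f) / f).toNat f
          = pat ++ List.replicate (r / f).toNat f := by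
        rw [hdiv, List.append_assoc]
        congr 1
        have : (r / f).toNat = (r / f - 1).toNat + 1 := by omega
        rw [this, List.replicate_succ]
        simp
      rw [hrep, hmod]
    · rw [loopA]
      simp only [h0, hi, and_self, dif_pos, hget]
      rw [dif_neg (by omega)]
      have hdiv : r / f = 0 := Int.ediv_eq_zero_of_lt hr (by omega)
      have hmod : r % f = r := Int.emod_eq_of_lt hr (by omega)
      rw [hdiv, hmod]
      simp
  · have hr0 : r = 0 := by omega
    subst hr0
    rw [loopA_zero]
    simp [loopA_zero]
termination_by r.toNat
decreasing_by omega

-- Chaining the previous lemma down the list: A's loop from index n-1 equals B's fold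
-- over the reversed n-prefix of the Fibonacci list.
theorem loopA_chain (n : Nat) (hn : n ≤ 13) (pat : List Int) (r : Int) (hr : 0 ≤ r) :
    loopA pat r ((n : Int) - 1) = (fibList.take n).reverse.foldl stepB (pat, r) := by
  induction n generalizing pat r with
  | zero =>
    rw [loopA]
    simp
  | succ m ih =>
    have hm : m ≤ 13 := by omega
    have hmlt : m < fibList.length := by simp [fibList]; omega
    have htake : (fibList.take (m + 1)).reverse = fibList[m] :: (fibList.take m).reverse := by
      rw [List.take_add_one]
      simp [List.getElem?_eq_getElem hmlt]
    have hget : (PySem.List.pyGet? fibList (m : Int)).getD 0 = fibList[m] := by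
      rw [PySem.List.pyGet?_natCast]
      simp [List.getElem?_eq_getElem hmlt]
    have hfpos : (0 : Int) < fibList[m] := by
      have hall : ∀ x ∈ fibList, (0 : Int) < x := by decide
      exact hall _ (List.getElem_mem hmlt)
    have hstep := loopA_div pat r (m : Int) fibList[m] hr (by omega) hfpos hget
    have hi : ((m : Int) + 1) - 1 = (m : Int) := by ring
    rw [show ((m + 1 : Nat) : Int) - 1 = (m : Int) by push_cast; ring, hstep, htake,
      List.foldl_cons]
    have hmod : 0 ≤ PySem.Int.mod r fibList[m] := by
      rw [PySem.Int.mod_eq_emod_of_pos hfpos]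
      exact Int.emod_nonneg r (by omega)
    exact ih hm _ _ hmod

-- ===== VERDICT (by name: the statement is the Claim_ definition above) =====
theorem fibonacci_duration_pattern_spec : Claim_equal_fibonacci_duration_pattern := by
  intro bars _
  unfold Spec_fibonacci_duration_pattern fibonacci_duration_pattern fibonacci_duration_pattern_alt
  by_cases hb : bars ≤ 0
  · simp [hb]
  · simp only [hb, if_false]
    have h := loopA_chain 13 (by omega) [] bars (by omega)
    have hlen : ((fibList.length : Nat) : Int) - 1 = ((13 : Nat) : Int) - 1 := by
      simp [fibList]
    rw [hlen, h]
    simp [fibList]
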